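-- pv_equiv track=rewrite | github.com/AAB111/test_task | task1/task1.py | circular_array_path
-- ===== SOURCE A (Python) =====
-- def circular_array_path(n, m):
--     path = []
--     current_position = 0
--     if m == 0:
--         first_element = 1
--         return str(first_element)
--     while True:
--         first_element = current_position + 1
--         path.append(first_element)
--         current_position = (current_position + m - 1) % n
--         if current_position == 0:
--             break
--
--     return ''.join(map(str, path))
-- ===== SOURCE B (Python) =====
-- import math
--
-- def circular_array_path(n, m):
--     if m == 0:
--         return '1'
--     s = (m - 1) % n  # raises ZeroDivisionError for n == 0, like A's loop
--     period = abs(n) // math.gcd(n, s)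
--     return ''.join(str(i * (m - 1) % n + 1) for i in range(period))
-- ===== Notes on version B (the rewrite author's own statement) =====
-- stated objective: alternative
-- what changed: Replaces A's step-and-test while-loop (iterate current=(current+m-1)%n until it returns to 0) with a closed-form cycle length period=|n|//gcd(n,m-1) and direct indexed generation (i*(m-1))%n+1 for i in range(period).
import Mathlib
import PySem

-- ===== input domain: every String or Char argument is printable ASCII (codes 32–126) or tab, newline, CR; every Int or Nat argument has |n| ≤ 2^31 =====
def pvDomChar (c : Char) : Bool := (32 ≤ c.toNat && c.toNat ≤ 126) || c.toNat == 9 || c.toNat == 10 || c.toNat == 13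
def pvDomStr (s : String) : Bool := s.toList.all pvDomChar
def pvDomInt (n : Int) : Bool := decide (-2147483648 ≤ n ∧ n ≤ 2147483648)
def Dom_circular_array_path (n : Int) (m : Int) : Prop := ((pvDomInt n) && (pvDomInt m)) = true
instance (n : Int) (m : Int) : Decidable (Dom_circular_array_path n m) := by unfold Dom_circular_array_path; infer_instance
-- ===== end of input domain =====

-- B replaces A's step-and-test while-loop by a closed-form cycle length |n|/gcd(n,m-1)
-- and direct indexed generation of the visited positions (alternative decomposition).

-- ===== PORT A =====
-- the while-True loop of A, with fuel (the loop terminates within |n| steps; fuel only makes it total)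
def caLoop (n m : Int) : Nat → Int → List Int → List Int
  | 0, _, path => path
  | fuel+1, current_position, path =>
    let first_element := current_position + 1
    let path' := path ++ [first_element]
    let current' := PySem.Int.mod (current_position + m - 1) n
    if current' = 0 then path' else caLoop n m fuel current' path'

def circular_array_path (n : Int) (m : Int) : String :=
  if m = 0 then PySem.Int.toStr 1
  else PySem.Str.join "" ((caLoop n m n.natAbs 0 []).map PySem.Int.toStr)

-- ===== PORT B =====
def circular_array_path_alt (n : Int) (m : Int) : String :=
  if m = 0 then "1"
  else
    let s := PySem.Int.mod (m - 1) n
    let period := n.natAbs / Int.gcd n s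
    PySem.Str.join ""
      ((List.range period).map (fun i => PySem.Int.toStr (PySem.Int.mod ((i : Int) * (m - 1)) n + 1)))

-- ===== PRECONDITION & SPEC =====
-- A raises ZeroDivisionError at '% n' when n = 0 and m ≠ 0 (and B raises there too); excluded.
def Pre_circular_array_path (n : Int) (m : Int) : Prop := m = 0 ∨ n ≠ 0
instance (n : Int) (m : Int) : Decidable (Pre_circular_array_path n m) := by
  unfold Pre_circular_array_path; infer_instance
def pvWitness_circular_array_path : Int × Int := (5, 2)

def Spec_circular_array_path (n : Int) (m : Int) (out : String) : Prop := out = circular_array_path_alt n m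
instance (n : Int) (m : Int) (out : String) : Decidable (Spec_circular_array_path n m out) := by unfold Spec_circular_array_path; infer_instance

-- ===== CLAIM (what is proved, stated in full; the proofs are below) =====
def Claim_equal_circular_array_path : Prop := ∀ (n : Int) (m : Int), Dom_circular_array_path n m → Pre_circular_array_path n m → Spec_circular_array_path n m (circular_array_path n m)

-- ===== LEMMAS AND PROOFS =====

-- Python's % is invariant under adding a multiple of the divisor to the dividend
lemma pymod_congr (n a b : Int) (hn : n ≠ 0) (h : n ∣ a - b) :
    PySem.Int.mod a n = PySem.Int.mod b n := by
  have ha := PySem.Int.floordiv_mul_add_mod a n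
  have hb := PySem.Int.floordiv_mul_add_mod b n
  have hd : n ∣ PySem.Int.mod a n - PySem.Int.mod b n := by
    obtain ⟨c, hc⟩ := h
    exact ⟨c - PySem.Int.floordiv a n + PySem.Int.floordiv b n, by linarith [hc]⟩
  have hz : PySem.Int.mod a n - PySem.Int.mod b n = 0 := by
    apply Int.eq_zero_of_dvd_of_natAbs_lt_natAbs hd
    rcases lt_or_gt_of_ne hn with hneg | hpos
    · have b1 := PySem.Int.mod_neg_bounds a hneg
      have b2 := PySem.Int.mod_neg_bounds b hneg
      omega
    · have b1 := PySem.Int.mod_nonneg a hpos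
      have b2 := PySem.Int.mod_lt a hpos
      have b3 := PySem.Int.mod_nonneg b hpos
      have b4 := PySem.Int.mod_lt b hpos
      omega
  omega

-- the minimal-period divisibility fact: N ∣ k·S  ↔  (N / gcd N S) ∣ k   (N > 0)
lemma period_dvd_iff (N S k : Nat) (hN : 0 < N) :
    N ∣ k * S ↔ (N / Nat.gcd N S) ∣ k := by
  set g := Nat.gcd N S with hg
  have hgpos : 0 < g := Nat.gcd_pos_of_pos_left _ hN
  have hgN : g ∣ N := Nat.gcd_dvd_left N S
  have hgS : g ∣ S := Nat.gcd_dvd_right N S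
  have hNe : g * (N / g) = N := Nat.mul_div_cancel' hgN
  have hSe : g * (S / g) = S := Nat.mul_div_cancel' hgS
  have hcop : Nat.Coprime (N / g) (S / g) := Nat.coprime_div_gcd_div_gcd hgpos
  constructor
  · intro h
    have hks : k * S = g * (k * (S / g)) := by
      conv_lhs => rw [← hSe]
      ring
    have h' : g * (N / g) ∣ g * (k * (S / g)) := by rw [hNe, ← hks]; exact h
    have h'' : (N / g) ∣ k * (S / g) := (Nat.mul_dvd_mul_iff_left hgpos).mp h'
    exact hcop.dvd_of_dvd_mul_right h''
  · rintro ⟨t, ht⟩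
    refine ⟨t * (S / g), ?_⟩
    rw [ht]
    conv_lhs => rw [← hSe]
    conv_rhs => rw [← hNe]
    ring

-- loop body ≡ indexed generation: starting at position k·(m-1) mod n with j = p - k steps left
lemma caLoop_run (n m : Int) (hn : n ≠ 0) (p : Nat)
    (hdvd : ∀ k : Nat, (n ∣ (k : Int) * (m - 1)) ↔ p ∣ k) :
    ∀ (j k : Nat) (fuel : Nat) (acc : List Int), k + (j + 1) = p → j + 1 ≤ fuel →
      caLoop n m fuel (PySem.Int.mod ((k : Int) * (m - 1)) n) acc
        = acc ++ (List.range' k (j + 1)).map (fun i => PySem.Int.mod ((i : Int) * (m - 1)) n + 1) := by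
  intro j
  induction j with
  | zero =>
    intro k fuel acc hk hf
    obtain ⟨f, rfl⟩ : ∃ f, fuel = f + 1 := ⟨fuel - 1, by omega⟩
    have hstep : PySem.Int.mod (PySem.Int.mod ((k : Int) * (m - 1)) n + m - 1) n
        = PySem.Int.mod (((k : Int) + 1) * (m - 1)) n := by
      apply pymod_congr n _ _ hn
      have := PySem.Int.floordiv_mul_add_mod ((k : Int) * (m - 1)) n
      have hexp : ((k : Int) + 1) * (m - 1) = (k : Int) * (m - 1) + (m - 1) := by ring
      exact ⟨-(PySem.Int.floordiv ((k : Int) * (m - 1)) n), by linarith⟩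
    have hbreak : PySem.Int.mod (((k : Int) + 1) * (m - 1)) n = 0 := by
      rw [PySem.Int.mod_eq_zero_iff_dvd]
      have : ((k + 1 : Nat) : Int) = (k : Int) + 1 := by push_cast; ring
      rw [← this]
      exact (hdvd (k + 1)).mpr ⟨1, by omega⟩
    simp [caLoop, hstep, hbreak, List.range']
  | succ j ih =>
    intro k fuel acc hk hf
    obtain ⟨f, rfl⟩ : ∃ f, fuel = f + 1 := ⟨fuel - 1, by omega⟩
    have hstep : PySem.Int.mod (PySem.Int.mod ((k : Int) * (m - 1)) n + m - 1) n
        = PySem.Int.mod (((k + 1 : Nat) : Int) * (m - 1)) n := by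
      apply pymod_congr n _ _ hn
      have := PySem.Int.floordiv_mul_add_mod ((k : Int) * (m - 1)) n
      have hexp : (((k + 1 : Nat) : Int)) * (m - 1) = (k : Int) * (m - 1) + (m - 1) := by
        push_cast; ring
      exact ⟨-(PySem.Int.floordiv ((k : Int) * (m - 1)) n), by linarith⟩
    have hnobreak : ¬ PySem.Int.mod (((k + 1 : Nat) : Int) * (m - 1)) n = 0 := by
      rw [PySem.Int.mod_eq_zero_iff_dvd, hdvd (k + 1)]
      intro h
      have := Nat.le_of_dvd (by omega) h
      omega
    have hrec := ih (k + 1) f (acc ++ [PySem.Int.mod ((k : Int) * (m - 1)) n + 1])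
      (by omega) (by omega)
    simp only [caLoop, hstep, if_neg hnobreak]
    rw [hrec]
    simp [List.range', List.append_assoc]

-- the two list expressions agree (the core equality behind the spec)
lemma lists_eq (n m : Int) (hn : n ≠ 0) :
    caLoop n m n.natAbs 0 []
      = (List.range (n.natAbs / Int.gcd n (PySem.Int.mod (m - 1) n))).map
          (fun i => PySem.Int.mod ((i : Int) * (m - 1)) n + 1) := by
  have hNpos : 0 < n.natAbs := by omega
  -- gcd is unchanged by reducing m-1 mod n
  have hgcd : Int.gcd n (PySem.Int.mod (m - 1) n) = Int.gcd n (m - 1) := by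
    have h := PySem.Int.floordiv_mul_add_mod (m - 1) n
    have hrepr : PySem.Int.mod (m - 1) n = (m - 1) + (-(PySem.Int.floordiv (m - 1) n)) * n := by
      linarith
    rw [hrepr, Int.gcd_add_mul_right_right]
  set p := n.natAbs / Int.gcd n (m - 1) with hp
  have hdvd : ∀ k : Nat, (n ∣ (k : Int) * (m - 1)) ↔ p ∣ k := by
    intro k
    have h1 : (n ∣ (k : Int) * (m - 1)) ↔ n.natAbs ∣ ((k : Int) * (m - 1)).natAbs :=
      Int.natAbs_dvd_natAbs.symm
    rw [h1, Int.natAbs_mul, Int.natAbs_natCast]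
    exact period_dvd_iff n.natAbs (m - 1).natAbs k hNpos
  have hppos : 0 < p := by
    apply Nat.div_pos (Nat.le_of_dvd hNpos (Nat.gcd_dvd_left _ _))
    exact Nat.gcd_pos_of_pos_left _ hNpos
  have hzero : (0 : Int) = PySem.Int.mod ((0 : Nat) * (m - 1)) n := by
    have : PySem.Int.mod (((0 : Nat) : Int) * (m - 1)) n = 0 := by
      rw [PySem.Int.mod_eq_zero_iff_dvd]; simp
    omega
  obtain ⟨j, hj⟩ : ∃ j, p = j + 1 := ⟨p - 1, by omega⟩
  have hrun := caLoop_run n m hn p hdvd j 0 n.natAbs [] (by omega)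
    (by rw [← hj]; exact Nat.div_le_self _ _)
  rw [hgcd, ← hp, hj]
  calc caLoop n m n.natAbs 0 []
      = caLoop n m n.natAbs (PySem.Int.mod ((0 : Nat) * (m - 1)) n) [] := by rw [← hzero]
    _ = (List.range' 0 (j + 1)).map (fun i => PySem.Int.mod ((i : Int) * (m - 1)) n + 1) := hrun
    _ = (List.range (j + 1)).map (fun i => PySem.Int.mod ((i : Int) * (m - 1)) n + 1) := by
        rw [List.range_eq_range']

-- ===== VERDICT (by name: the statement is the Claim_ definition above) =====
theorem circular_array_path_spec : Claim_equal_circular_array_path := by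
  intro n m _ hpre
  unfold Spec_circular_array_path circular_array_path circular_array_path_alt
  by_cases hm : m = 0
  · simp [hm]
    decide
  · rcases hpre with h | hn
    · exact absurd h hm
    · simp only [if_neg hm]
      rw [lists_eq n m hn]
      simp [List.map_map, Function.comp_def]
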